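-- pv_equiv track=rewrite | github.com/FarshadAmiri/Algorithmic_programming | Quera assignments/6- تمرین های دوره ای 1/25- Palindromania.py | assign_certain_chars3
-- ===== SOURCE A (Python) =====
-- def assign_certain_chars3(st):
--     a_list = []
--     b_list = []
--     for i in range(len(st)):
--         if st[i] == 'a':
--             a_list.append(i)
--         if st[i] == 'b':
--             b_list.append(i)
--     for i in a_list:
--         ip4 = i
--         while (ip4 >= 0) and (ip4 < len(st)):
--             if ip4 not in a_list:
--                 a_list.append(ip4)
--             ip4 = ip4 + 4
--         in4 = i
--         while (in4 >= 0) and (in4 < len(st)):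
--             if in4 not in a_list:
--                 a_list.append(in4)
--             else:
--                 in4 = in4 - 4
--         ip2 = i + 2
--         while (ip2 >= 0) and (ip2 < len(st)):
--             if ip2 not in b_list:
--                 b_list.append(ip2)
--             ip2 = ip2 + 4
--         in2 = i - 2
--         while (in2 >= 0) and (in2 < len(st)):
--             if in2 not in b_list:
--                 b_list.append(in2)
--             else:
--                 in2 = in2 - 4
--     for i in b_list:
--         ip4 = i
--         while (ip4 >= 0) and (ip4 < len(st)):
--             if ip4 not in b_list:
--                 b_list.append(ip4)
--             ip4 = ip4 + 4
--         in4 = i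
--         while (in4 >= 0) and (in4 < len(st)):
--             if in4 not in b_list:
--                 b_list.append(in4)
--             else:
--                 in4 = in4 - 4
--         ip2 = i + 2
--         while (ip2 >= 0) and (ip2 < len(st)):
--             if ip2 not in a_list:
--                 a_list.append(ip2)
--             ip2 = ip2 + 4
--         in2 = i - 2
--         while (in2 >= 0) and (in2 < len(st)):
--             if in2 not in a_list:
--                 a_list.append(in2)
--             else:
--                 in2 = in2 - 4
--     for i in a_list:
--         if st[i] != 'a':
--             try:
--                 st = st[:i] + 'a' + st[i+1:]
--             except:
--                 continue
--     for i in b_list: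
--         if st[i] != 'b':
--             try:
--                 st = st[:i] + 'b' + st[i+1:]
--             except:
--                 continue
--     return st
-- ===== SOURCE B (Python) =====
-- def assign_certain_chars3(st):
--     ra = [False] * 4
--     rb = [False] * 4
--     for i, c in enumerate(st):
--         if c == 'a':
--             ra[i % 4] = True
--         if c == 'b':
--             rb[i % 4] = True
--     out = []
--     for i, c in enumerate(st):
--         if rb[i % 4] or ra[(i + 2) % 4]:
--             out.append('b')
--         elif ra[i % 4] or rb[(i + 2) % 4]:
--             out.append('a')
--         else:
--             out.append(c)
--     return ''.join(out)
-- ===== Notes on version B (the rewrite author's own statement) =====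
-- stated objective: faster
-- what changed: Replaces the quadratic-and-worse closure computation over growing index lists (with repeated 'in list' scans and per-element string slicing) by two O(n) passes: collect which residues mod 4 hold an 'a'/'b' seed, then rebuild the string in one pass ('b' wins over 'a', cross-residue r+2 swaps the letter).
import Mathlib
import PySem

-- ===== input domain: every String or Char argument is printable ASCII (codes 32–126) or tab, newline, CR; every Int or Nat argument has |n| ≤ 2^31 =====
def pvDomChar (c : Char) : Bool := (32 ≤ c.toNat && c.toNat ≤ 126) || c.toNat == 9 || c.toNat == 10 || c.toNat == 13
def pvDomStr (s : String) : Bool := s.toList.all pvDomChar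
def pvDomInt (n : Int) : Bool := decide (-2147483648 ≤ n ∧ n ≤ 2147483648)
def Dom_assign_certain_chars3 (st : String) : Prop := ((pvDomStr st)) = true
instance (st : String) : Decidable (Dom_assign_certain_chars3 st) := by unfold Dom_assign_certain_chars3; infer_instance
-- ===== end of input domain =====

-- B replaces A's repeated list-scan propagation and per-write string slicing by two linear passes
-- over the residue classes mod 4 (measured asymptotically faster).

-- ===== PORT A =====
-- while ip >= 0 and ip < n: if ip not in lst: lst.append(ip); ip += 4   (the two 'ipX' while loops)
def upLoop (n ip : Int) (lst : List Int) : List Int :=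
  if _h : 0 ≤ ip ∧ ip < n then
    upLoop n (ip + 4) (if ip ∈ lst then lst else lst ++ [ip])
  else lst
termination_by (n - ip).toNat
decreasing_by omega

-- while iv >= 0 and iv < n: if iv not in lst: lst.append(iv) else: iv -= 4   (the two 'inX' while loops)
def downLoop (n iv : Int) (lst : List Int) : List Int :=
  if _h : 0 ≤ iv ∧ iv < n then
    if hm : iv ∈ lst then downLoop n (iv - 4) lst
    else downLoop n iv (lst ++ [iv])
  else lst
termination_by 2 * (iv + 4).toNat + (if iv ∈ lst then 0 else 1)
decreasing_by
  · split_ifs <;> omega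
  · simp [hm]

-- the second and third for-loops of A are textually identical (iterate xl while it grows, close xl
-- under ±4, cross into yl at ±2); fuel only makes the iteration over the growing list total —
-- the list is nodup with entries in [0, n), so fuel = n + 1 is never exhausted (proved below)
def propagate (n : Int) (fuel k : Nat) (xl yl : List Int) : List Int × List Int :=
  match fuel with
  | 0 => (xl, yl)
  | fuel + 1 =>
    match xl[k]? with
    | none => (xl, yl)
    | some i =>
      let xl1 := downLoop n i (upLoop n i xl)
      let yl1 := downLoop n (i - 2) (upLoop n (i + 2) yl)
      propagate n fuel (k + 1) xl1 yl1

-- first loop of A: collect the indices holding 'a' and those holding 'b'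
-- (the .getD ' ' default is never used: i ranges over the valid indices)
def seeds (l : List Char) : List Int × List Int :=
  (PySem.List.pyRange 0 (l.length : Int) 1).foldl
    (fun p i =>
      ((if (PySem.List.pyGet? l i).getD ' ' = 'a' then p.1 ++ [i] else p.1),
       (if (PySem.List.pyGet? l i).getD ' ' = 'b' then p.2 ++ [i] else p.2)))
    ([], [])

-- if st[i] != ch: st = st[:i] + ch + st[i+1:]  (the try/except never fires: i is a valid index,
-- and st[i] itself would raise before the try on an invalid one — the none branch is unreachable)
def writeChar (ch : Char) (s : List Char) (i : Int) : List Char :=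
  match PySem.List.pyGet? s i with
  | none => s
  | some cur =>
    if cur ≠ ch then
      PySem.List.slice s none (some i) ++ [ch] ++ PySem.List.slice s (some (i + 1)) none
    else s

def assign_certain_chars3 (st : String) : String :=
  let l := st.toList
  let n : Int := (l.length : Int)
  let sd := seeds l
  let p1 := propagate n (l.length + 1) 0 sd.1 sd.2
  let p2 := propagate n (l.length + 1) 0 p1.2 p1.1
  let la := p2.2.foldl (writeChar 'a') l
  let lb := p2.1.foldl (writeChar 'b') la
  String.ofList lb

-- ===== PORT B =====
def assign_certain_chars3_alt (st : String) : String :=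
  let l := st.toList
  let t := l.zipIdx.foldl
    (fun (p : List Bool × List Bool) ci =>
      ((if ci.1 = 'a' then p.1.set (ci.2 % 4) true else p.1),
       (if ci.1 = 'b' then p.2.set (ci.2 % 4) true else p.2)))
    (List.replicate 4 false, List.replicate 4 false)
  String.ofList <| l.zipIdx.map (fun ci =>
    if t.2.getD (ci.2 % 4) false || t.1.getD ((ci.2 + 2) % 4) false then 'b'
    else if t.1.getD (ci.2 % 4) false || t.2.getD ((ci.2 + 2) % 4) false then 'a'
    else ci.1)

-- ===== PRECONDITION & SPEC =====
def Spec_assign_certain_chars3 (st : String) (out : String) : Prop := out = assign_certain_chars3_alt st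
instance (st : String) (out : String) : Decidable (Spec_assign_certain_chars3 st out) := by unfold Spec_assign_certain_chars3; infer_instance

-- ===== CLAIM (what is proved, stated in full; the proofs are below) =====
def Claim_equal_assign_certain_chars3 : Prop := ∀ (st : String), Dom_assign_certain_chars3 st → Spec_assign_certain_chars3 st (assign_certain_chars3 st)

-- ===== LEMMAS AND PROOFS =====

-- position j belongs to the residue class of i (mod 4) inside [0, n)
def cls (n i j : Int) : Prop := 0 ≤ j ∧ j < n ∧ (4:Int) ∣ (j - i)

theorem mem_upLoop (n ip : Int) (lst : List Int) (h0 : 0 ≤ ip) (j : Int) :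
    j ∈ upLoop n ip lst ↔ j ∈ lst ∨ (ip ≤ j ∧ j < n ∧ (4:Int) ∣ (j - ip)) := by
  rw [upLoop]
  split_ifs with h hm
  · rw [mem_upLoop n (ip + 4) lst (by omega) j]
    constructor
    · rintro (hj | ⟨h1, h2, h3⟩)
      · exact Or.inl hj
      · exact Or.inr ⟨by omega, h2, by omega⟩
    · rintro (hj | ⟨h1, h2, h3⟩)
      · exact Or.inl hj
      · by_cases hji : j = ip
        · exact Or.inl (hji ▸ hm)
        · exact Or.inr ⟨by omega, h2, by omega⟩
  · rw [mem_upLoop n (ip + 4) (lst ++ [ip]) (by omega) j]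
    simp only [List.mem_append, List.mem_singleton]
    constructor
    · rintro ((hj | hj) | ⟨h1, h2, h3⟩)
      · exact Or.inl hj
      · exact Or.inr ⟨by omega, by omega, by omega⟩
      · exact Or.inr ⟨by omega, h2, by omega⟩
    · rintro (hj | ⟨h1, h2, h3⟩)
      · exact Or.inl (Or.inl hj)
      · by_cases hji : j = ip
        · exact Or.inl (Or.inr hji)
        · exact Or.inr ⟨by omega, h2, by omega⟩
  · constructor
    · exact Or.inl
    · rintro (hj | ⟨h1, h2, h3⟩)
      · exact hj
      · omega
termination_by (n - ip).toNat
decreasing_by all_goals omega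

theorem mem_downLoop (n iv : Int) (lst : List Int) (j : Int) :
    j ∈ downLoop n iv lst ↔ j ∈ lst ∨ (0 ≤ j ∧ j ≤ iv ∧ iv < n ∧ (4:Int) ∣ (iv - j)) := by
  rw [downLoop]
  split_ifs with h hm
  · rw [mem_downLoop n (iv - 4) lst j]
    constructor
    · rintro (hj | ⟨h1, h2, h3, h4⟩)
      · exact Or.inl hj
      · exact Or.inr ⟨h1, by omega, by omega, by omega⟩
    · rintro (hj | ⟨h1, h2, h3, h4⟩)
      · exact Or.inl hj
      · by_cases hji : j = iv
        · exact Or.inl (hji ▸ hm)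
        · exact Or.inr ⟨h1, by omega, by omega, by omega⟩
  · rw [mem_downLoop n iv (lst ++ [iv]) j]
    simp only [List.mem_append, List.mem_singleton]
    constructor
    · rintro ((hj | hj) | ⟨h1, h2, h3, h4⟩)
      · exact Or.inl hj
      · exact Or.inr ⟨by omega, by omega, by omega, by omega⟩
      · exact Or.inr ⟨h1, h2, h3, h4⟩
    · rintro (hj | ⟨h1, h2, h3, h4⟩)
      · exact Or.inl (Or.inl hj)
      · exact Or.inr ⟨h1, h2, h3, h4⟩
  · constructor
    · exact Or.inl
    · rintro (hj | ⟨h1, h2, h3, h4⟩)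
      · exact hj
      · omega
termination_by 2 * (iv + 4).toNat + (if iv ∈ lst then 0 else 1)
decreasing_by
  · split_ifs <;> omega
  · simp [hm]

theorem upLoop_prefix (n ip : Int) (lst : List Int) : ∃ t, upLoop n ip lst = lst ++ t := by
  rw [upLoop]
  split_ifs with h hm
  · exact upLoop_prefix n (ip + 4) lst
  · obtain ⟨t, ht⟩ := upLoop_prefix n (ip + 4) (lst ++ [ip])
    exact ⟨[ip] ++ t, by rw [ht, List.append_assoc]⟩
  · exact ⟨[], by simp⟩
termination_by (n - ip).toNat
decreasing_by all_goals omega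

theorem downLoop_prefix (n iv : Int) (lst : List Int) : ∃ t, downLoop n iv lst = lst ++ t := by
  rw [downLoop]
  split_ifs with h hm
  · exact downLoop_prefix n (iv - 4) lst
  · obtain ⟨t, ht⟩ := downLoop_prefix n iv (lst ++ [iv])
    exact ⟨[iv] ++ t, by rw [ht, List.append_assoc]⟩
  · exact ⟨[], by simp⟩
termination_by 2 * (iv + 4).toNat + (if iv ∈ lst then 0 else 1)
decreasing_by
  · split_ifs <;> omega
  · simp [hm]

theorem upLoop_nodup (n ip : Int) (lst : List Int) (hnd : lst.Nodup) : (upLoop n ip lst).Nodup := by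
  rw [upLoop]
  split_ifs with h hm
  · exact upLoop_nodup n (ip + 4) lst hnd
  · refine upLoop_nodup n (ip + 4) (lst ++ [ip]) ?_
    simp only [List.nodup_append, List.nodup_singleton, true_and]
    refine ⟨hnd, ?_⟩
    intro a ha b hb hab
    rw [List.mem_singleton] at hb
    exact hm ((hab.trans hb) ▸ ha)
  · exact hnd
termination_by (n - ip).toNat
decreasing_by all_goals omega

theorem downLoop_nodup (n iv : Int) (lst : List Int) (hnd : lst.Nodup) : (downLoop n iv lst).Nodup := by
  rw [downLoop]
  split_ifs with h hm
  · exact downLoop_nodup n (iv - 4) lst hnd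
  · refine downLoop_nodup n iv (lst ++ [iv]) ?_
    simp only [List.nodup_append, List.nodup_singleton, true_and]
    refine ⟨hnd, ?_⟩
    intro a ha b hb hab
    rw [List.mem_singleton] at hb
    exact hm ((hab.trans hb) ▸ ha)
  · exact hnd
termination_by 2 * (iv + 4).toNat + (if iv ∈ lst then 0 else 1)
decreasing_by
  · split_ifs <;> omega
  · simp [hm]

theorem nodup_length_le (m : Nat) (lst : List Int) (h : lst.Nodup)
    (hr : ∀ x ∈ lst, 0 ≤ x ∧ x < (m : Int)) : lst.length ≤ m := by
  classical
  have hcard : lst.toFinset.card = lst.length := List.toFinset_card_of_nodup h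
  have hsub : lst.toFinset ⊆ Finset.Icc (0 : Int) ((m : Int) - 1) := by
    intro x hx
    rw [List.mem_toFinset] at hx
    have := hr x hx
    simp only [Finset.mem_Icc]
    omega
  have := Finset.card_le_card hsub
  rw [hcard, Int.card_Icc] at this
  omega

theorem propagate_spec (n : Int) (fuel : Nat) :
    ∀ (k : Nat) (xl yl : List Int),
    xl.Nodup → yl.Nodup →
    (∀ x ∈ xl, 0 ≤ x ∧ x < n) → (∀ y ∈ yl, 0 ≤ y ∧ y < n) →
    n.toNat + 1 ≤ fuel + k →
    (propagate n fuel k xl yl).1.Nodup ∧ (propagate n fuel k xl yl).2.Nodup ∧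
    (∀ x ∈ (propagate n fuel k xl yl).1, 0 ≤ x ∧ x < n) ∧
    (∀ y ∈ (propagate n fuel k xl yl).2, 0 ≤ y ∧ y < n) ∧
    (∀ j, j ∈ (propagate n fuel k xl yl).1 ↔ j ∈ xl ∨ ∃ i ∈ xl.drop k, cls n i j) ∧
    (∀ j, j ∈ (propagate n fuel k xl yl).2 ↔ j ∈ yl ∨ ∃ i ∈ xl.drop k, cls n (i + 2) j) := by
  induction fuel with
  | zero =>
    intro k xl yl hnx hny hrx hry hf
    have hlen : xl.length ≤ n.toNat := nodup_length_le n.toNat xl hnx (by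
      intro x hx
      have := hrx x hx
      constructor <;> omega)
    have hdrop : xl.drop k = [] := List.drop_eq_nil_of_le (by omega)
    simp only [propagate]
    exact ⟨hnx, hny, hrx, hry, by intro j; simp [hdrop], by intro j; simp [hdrop]⟩
  | succ fuel IH =>
    intro k xl yl hnx hny hrx hry hf
    cases hg : xl[k]? with
    | none =>
      have hk : xl.length ≤ k := by
        by_contra hc
        push_neg at hc
        rw [List.getElem?_eq_getElem hc] at hg
        cases hg
      have hdrop : xl.drop k = [] := List.drop_eq_nil_of_le hk
      simp only [propagate, hg]
      exact ⟨hnx, hny, hrx, hry, by intro j; simp [hdrop], by intro j; simp [hdrop]⟩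
    | some i =>
      have hk : k < xl.length := by
        by_contra hc
        push_neg at hc
        rw [List.getElem?_eq_none hc] at hg
        cases hg
      have hival : xl[k] = i := by
        have h2 := List.getElem?_eq_getElem hk
        rw [hg] at h2
        exact (Option.some.inj h2).symm
      have hi_mem : i ∈ xl := hival ▸ List.getElem_mem hk
      obtain ⟨hi0, hin⟩ := hrx i hi_mem
      have hmx : ∀ j, j ∈ downLoop n i (upLoop n i xl) ↔ j ∈ xl ∨ cls n i j := by
        intro j
        rw [mem_downLoop, mem_upLoop n i xl hi0]
        unfold cls
        constructor
        · rintro ((hj | ⟨h1, h2, h3⟩) | ⟨h1, h2, h3, h4⟩)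
          · exact Or.inl hj
          · exact Or.inr ⟨by omega, h2, h3⟩
          · exact Or.inr ⟨h1, by omega, by omega⟩
        · rintro (hj | ⟨h1, h2, h3⟩)
          · exact Or.inl (Or.inl hj)
          · by_cases hij : i ≤ j
            · exact Or.inl (Or.inr ⟨hij, h2, h3⟩)
            · exact Or.inr ⟨h1, by omega, hin, by omega⟩
      have hmy : ∀ j, j ∈ downLoop n (i - 2) (upLoop n (i + 2) yl) ↔ j ∈ yl ∨ cls n (i + 2) j := by
        intro j
        rw [mem_downLoop, mem_upLoop n (i + 2) yl (by omega)]
        unfold cls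
        constructor
        · rintro ((hj | ⟨h1, h2, h3⟩) | ⟨h1, h2, h3, h4⟩)
          · exact Or.inl hj
          · exact Or.inr ⟨by omega, h2, h3⟩
          · exact Or.inr ⟨h1, by omega, by omega⟩
        · rintro (hj | ⟨h1, h2, h3⟩)
          · exact Or.inl (Or.inl hj)
          · by_cases hij : i + 2 ≤ j
            · exact Or.inl (Or.inr ⟨hij, h2, h3⟩)
            · exact Or.inr ⟨h1, by omega, by omega, by omega⟩
      set xl1 := downLoop n i (upLoop n i xl) with hxl1
      set yl1 := downLoop n (i - 2) (upLoop n (i + 2) yl) with hyl1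
      have hnx1 : xl1.Nodup := downLoop_nodup _ _ _ (upLoop_nodup _ _ _ hnx)
      have hny1 : yl1.Nodup := downLoop_nodup _ _ _ (upLoop_nodup _ _ _ hny)
      have hrx1 : ∀ x ∈ xl1, 0 ≤ x ∧ x < n := by
        intro x hx
        rcases (hmx x).1 hx with h | h
        · exact hrx x h
        · exact ⟨h.1, h.2.1⟩
      have hry1 : ∀ y ∈ yl1, 0 ≤ y ∧ y < n := by
        intro y hy
        rcases (hmy y).1 hy with h | h
        · exact hry y h
        · exact ⟨h.1, h.2.1⟩
      obtain ⟨t, ht⟩ : ∃ t, xl1 = xl ++ t := by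
        obtain ⟨t1, ht1⟩ := upLoop_prefix n i xl
        obtain ⟨t2, ht2⟩ := downLoop_prefix n i (upLoop n i xl)
        exact ⟨t1 ++ t2, by rw [hxl1, ht2, ht1, List.append_assoc]⟩
      have hstep : propagate n (fuel + 1) k xl yl = propagate n fuel (k + 1) xl1 yl1 := by
        rw [hxl1, hyl1]
        simp only [propagate, hg]
      obtain ⟨P1, P2, P3, P4, P5, P6⟩ := IH (k + 1) xl1 yl1 hnx1 hny1 hrx1 hry1 (by omega)
      rw [hstep]
      have hdropc : xl.drop k = xl[k] :: xl.drop (k + 1) := List.drop_eq_getElem_cons hk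
      have hdrop1 : xl1.drop (k + 1) = xl.drop (k + 1) ++ t := by
        rw [ht, List.drop_append_of_le_length (by omega)]
      have hikmem : i ∈ xl.drop k := by
        rw [hdropc, hival]
        exact List.mem_cons_self ..
      have tmem : ∀ i' ∈ t, cls n i i' := by
        intro i' h'
        have hi'x : i' ∉ xl := by
          intro hcon
          have hd := List.disjoint_of_nodup_append (ht ▸ hnx1)
          exact hd hcon h'
        have hi'1 : i' ∈ xl1 := by
          rw [ht]
          exact List.mem_append_right _ h'
        rcases (hmx i').1 hi'1 with h'' | h''
        · exact absurd h'' hi'x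
        · exact h''
      refine ⟨P1, P2, P3, P4, ?_, ?_⟩
      · intro j
        rw [P5 j]
        constructor
        · rintro (hj | ⟨i', hi', hc⟩)
          · rcases (hmx j).1 hj with h | h
            · exact Or.inl h
            · exact Or.inr ⟨i, hikmem, h⟩
          · rw [hdrop1, List.mem_append] at hi'
            rcases hi' with h' | h'
            · refine Or.inr ⟨i', ?_, hc⟩
              rw [hdropc]
              exact List.mem_cons_of_mem _ h'
            · have hcls := tmem i' h'
              refine Or.inr ⟨i, hikmem, ?_⟩
              unfold cls at hcls hc ⊢
              omega
        · rintro (hj | ⟨i', hi', hc⟩)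
          · exact Or.inl ((hmx j).2 (Or.inl hj))
          · rw [hdropc] at hi'
            rcases List.mem_cons.mp hi' with rfl | h'
            · exact Or.inl ((hmx j).2 (Or.inr (hival ▸ hc)))
            · exact Or.inr ⟨i', by rw [hdrop1]; exact List.mem_append_left _ h', hc⟩
      · intro j
        rw [P6 j]
        constructor
        · rintro (hj | ⟨i', hi', hc⟩)
          · rcases (hmy j).1 hj with h | h
            · exact Or.inl h
            · exact Or.inr ⟨i, hikmem, h⟩
          · rw [hdrop1, List.mem_append] at hi'
            rcases hi' with h' | h'
            · refine Or.inr ⟨i', ?_, hc⟩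
              rw [hdropc]
              exact List.mem_cons_of_mem _ h'
            · have hcls := tmem i' h'
              refine Or.inr ⟨i, hikmem, ?_⟩
              unfold cls at hcls hc ⊢
              omega
        · rintro (hj | ⟨i', hi', hc⟩)
          · exact Or.inl ((hmy j).2 (Or.inl hj))
          · rw [hdropc] at hi'
            rcases List.mem_cons.mp hi' with rfl | h'
            · exact Or.inl ((hmy j).2 (Or.inr (hival ▸ hc)))
            · exact Or.inr ⟨i', by rw [hdrop1]; exact List.mem_append_left _ h', hc⟩

theorem pyRange_zero_nodup (m : Int) : (PySem.List.pyRange 0 m 1).Nodup := by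
  rw [PySem.List.pyRange_one]
  refine List.Nodup.map ?_ List.nodup_range
  intro a b hab
  simp at hab
  omega

theorem seeds_closed (l : List Char) :
    seeds l = ((PySem.List.pyRange 0 (l.length : Int) 1).filter (fun i => decide ((PySem.List.pyGet? l i).getD ' ' = 'a')),
               (PySem.List.pyRange 0 (l.length : Int) 1).filter (fun i => decide ((PySem.List.pyGet? l i).getD ' ' = 'b'))) := by
  unfold seeds
  rw [PySem.List.foldl_prod_mk
      (f := fun acc i => if (PySem.List.pyGet? l i).getD ' ' = 'a' then acc ++ [i] else acc)
      (g := fun acc i => if (PySem.List.pyGet? l i).getD ' ' = 'b' then acc ++ [i] else acc)]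
  rw [PySem.List.foldl_append_ite_eq_filter, PySem.List.foldl_append_ite_eq_filter]
  simp

theorem seeds_mem_char (l : List Char) (c : Char) (j : Int) (h0 : 0 ≤ j) (h1 : j < (l.length : Int)) :
    ((PySem.List.pyGet? l j).getD ' ' = c) ↔ l[j.toNat]? = some c := by
  rw [PySem.List.pyGet?_eq_some_getElem l h0 (by exact_mod_cast h1)]
  have hlt : j.toNat < l.length := by omega
  rw [List.getElem?_eq_getElem hlt]
  simp

theorem seeds_spec (l : List Char) :
    (seeds l).1.Nodup ∧ (seeds l).2.Nodup ∧
    (∀ x ∈ (seeds l).1, 0 ≤ x ∧ x < (l.length : Int)) ∧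
    (∀ y ∈ (seeds l).2, 0 ≤ y ∧ y < (l.length : Int)) ∧
    (∀ j : Int, j ∈ (seeds l).1 ↔ 0 ≤ j ∧ j < (l.length : Int) ∧ l[j.toNat]? = some 'a') ∧
    (∀ j : Int, j ∈ (seeds l).2 ↔ 0 ≤ j ∧ j < (l.length : Int) ∧ l[j.toNat]? = some 'b') := by
  have h1 : (seeds l).1 = (PySem.List.pyRange 0 (l.length : Int) 1).filter (fun i => decide ((PySem.List.pyGet? l i).getD ' ' = 'a')) := by
    rw [seeds_closed]
  have h2 : (seeds l).2 = (PySem.List.pyRange 0 (l.length : Int) 1).filter (fun i => decide ((PySem.List.pyGet? l i).getD ' ' = 'b')) := by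
    rw [seeds_closed]
  refine ⟨?_, ?_, ?_, ?_, ?_, ?_⟩
  · rw [h1]; exact (pyRange_zero_nodup _).filter _
  · rw [h2]; exact (pyRange_zero_nodup _).filter _
  · intro x hx
    rw [h1, List.mem_filter, PySem.List.mem_pyRange_one] at hx
    exact ⟨hx.1.1, hx.1.2⟩
  · intro y hy
    rw [h2, List.mem_filter, PySem.List.mem_pyRange_one] at hy
    exact ⟨hy.1.1, hy.1.2⟩
  · intro j
    rw [h1, List.mem_filter, PySem.List.mem_pyRange_one]
    constructor
    · rintro ⟨⟨ha, hb⟩, hc⟩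
      exact ⟨ha, hb, (seeds_mem_char l 'a' j ha hb).1 (of_decide_eq_true hc)⟩
    · rintro ⟨ha, hb, hc⟩
      exact ⟨⟨ha, hb⟩, decide_eq_true ((seeds_mem_char l 'a' j ha hb).2 hc)⟩
  · intro j
    rw [h2, List.mem_filter, PySem.List.mem_pyRange_one]
    constructor
    · rintro ⟨⟨ha, hb⟩, hc⟩
      exact ⟨ha, hb, (seeds_mem_char l 'b' j ha hb).1 (of_decide_eq_true hc)⟩
    · rintro ⟨ha, hb, hc⟩
      exact ⟨⟨ha, hb⟩, decide_eq_true ((seeds_mem_char l 'b' j ha hb).2 hc)⟩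

theorem writeChar_eq_set (ch : Char) (s : List Char) (i : Int) (h0 : 0 ≤ i) (hn : i < (s.length : Int)) :
    writeChar ch s i = s.set i.toNat ch := by
  have hlt : i.toNat < s.length := by omega
  unfold writeChar
  rw [PySem.List.pyGet?_eq_some_getElem s h0 (by exact_mod_cast hn)]
  dsimp only
  split_ifs with hc
  · rw [PySem.List.slice_to s h0, PySem.List.slice_from s (by omega : (0:Int) ≤ i + 1)]
    have he : (i + 1).toNat = i.toNat + 1 := by omega
    rw [he, List.set_eq_take_append_cons_drop, if_pos hlt]
    simp
  · have hval : s[i.toNat] = ch := not_not.mp hc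
    refine List.ext_getElem (by simp) ?_
    intro j hj1 hj2
    rw [List.getElem_set]
    split_ifs with hji
    · subst hji
      exact hval
    · rfl

theorem write_fold (ch : Char) (L : List Int) :
    ∀ (s : List Char), (∀ i ∈ L, 0 ≤ i ∧ i < (s.length : Int)) →
    (L.foldl (writeChar ch) s).length = s.length ∧
    (∀ j : Nat, j < s.length → (L.foldl (writeChar ch) s)[j]? = if (j : Int) ∈ L then some ch else s[j]?) := by
  induction L with
  | nil =>
    intro s hr
    exact ⟨rfl, by intro j hj; simp⟩
  | cons i L IH =>
    intro s hr
    obtain ⟨hi0, hin⟩ := hr i (List.mem_cons_self ..)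
    have hset : writeChar ch s i = s.set i.toNat ch := writeChar_eq_set ch s i hi0 hin
    have hlen : (s.set i.toNat ch).length = s.length := by simp
    have hr' : ∀ x ∈ L, 0 ≤ x ∧ x < ((s.set i.toNat ch).length : Int) := by
      intro x hx
      rw [hlen]
      exact hr x (List.mem_cons_of_mem _ hx)
    obtain ⟨IH1, IH2⟩ := IH (s.set i.toNat ch) hr'
    rw [List.foldl_cons, hset]
    refine ⟨by rw [IH1, hlen], ?_⟩
    intro j hj
    rw [IH2 j (by rw [hlen]; exact hj)]
    by_cases hjL : (j : Int) ∈ L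
    · simp [hjL, List.mem_cons]
    · have hs : (s.set i.toNat ch)[j]? = if (j : Int) = i then some ch else s[j]? := by
        rw [List.getElem?_set]
        by_cases hij : i.toNat = j
        · rw [if_pos hij, if_pos (by omega : i.toNat < s.length), if_pos (by omega : (j : Int) = i)]
        · rw [if_neg hij, if_neg (by omega : ¬(j : Int) = i)]
      rw [if_neg hjL, hs]
      by_cases hji : (j : Int) = i
      · rw [if_pos hji, if_pos (by rw [List.mem_cons]; exact Or.inl hji)]
      · rw [if_neg hji, if_neg (by rw [List.mem_cons]; rintro (h | h); exact hji h; exact hjL h)]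

theorem table_getD (ch : Char) (pairs : List (Char × Nat)) :
    ∀ (acc : List Bool), acc.length = 4 → ∀ r : Nat, r < 4 →
    (pairs.foldl (fun acc ci => if ci.1 = ch then acc.set (ci.2 % 4) true else acc) acc).getD r false
      = (acc.getD r false || pairs.any (fun ci => ci.1 == ch && ci.2 % 4 == r)) := by
  induction pairs with
  | nil =>
    intro acc hl r hr
    simp
  | cons p tl IH =>
    intro acc hl r hr
    rw [List.foldl_cons, List.any_cons]
    by_cases hc : p.1 = ch
    · rw [if_pos hc]
      rw [IH (acc.set (p.2 % 4) true) (by simp [hl]) r hr]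
      have hgd : (acc.set (p.2 % 4) true).getD r false = (acc.getD r false || (p.2 % 4 == r)) := by
        rw [List.getD_eq_getElem?_getD, List.getD_eq_getElem?_getD, List.getElem?_set]
        by_cases h1 : p.2 % 4 = r
        · rw [if_pos h1, if_pos (by omega : p.2 % 4 < acc.length)]
          simp [h1]
        · rw [if_neg h1]
          simp [h1]
      rw [hgd]
      have hb : (p.1 == ch && p.2 % 4 == r) = (p.2 % 4 == r) := by simp [hc]
      rw [hb, Bool.or_assoc]
    · rw [if_neg hc]
      rw [IH acc hl r hr]
      have hb : (p.1 == ch && p.2 % 4 == r) = false := by simp [hc]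
      rw [hb, Bool.false_or]

theorem any_residue (l : List Char) (c : Char) (r : Nat) :
    (l.zipIdx.any (fun ci => ci.1 == c && ci.2 % 4 == r) = true) ↔
      (∃ k : Nat, k < l.length ∧ l[k]? = some c ∧ k % 4 = r) := by
  rw [List.any_eq_true]
  constructor
  · rintro ⟨ci, hmem, hp⟩
    obtain ⟨cc, k⟩ := ci
    rw [List.mem_zipIdx_iff_getElem?] at hmem
    simp only [beq_iff_eq, Bool.and_eq_true] at hp
    have hk : k < l.length := by
      by_contra hc
      push_neg at hc
      rw [List.getElem?_eq_none hc] at hmem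
      cases hmem
    refine ⟨k, hk, ?_, hp.2⟩
    rw [← hp.1]
    exact hmem
  · rintro ⟨k, hk, hc, hr⟩
    refine ⟨(c, k), ?_, ?_⟩
    · rw [List.mem_zipIdx_iff_getElem?]
      exact hc
    · simp [hr]

theorem map_zipIdx_getElem? {β : Type} (l : List Char) (f : Char × Nat → β) (j : Nat) (hj : j < l.length) :
    (l.zipIdx.map f)[j]? = some (f (l[j], j)) := by
  rw [List.getElem?_map, List.getElem?_zipIdx, List.getElem?_eq_getElem hj]
  simp

theorem final_memB (l : List Char) (j : Nat) (hj : j < l.length) :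
    ((j : Int) ∈ (propagate (l.length : Int) (l.length + 1) 0 (propagate (l.length : Int) (l.length + 1) 0 (seeds l).1 (seeds l).2).2 (propagate (l.length : Int) (l.length + 1) 0 (seeds l).1 (seeds l).2).1).1) ↔ ((∃ k, k < l.length ∧ l[k]? = some 'b' ∧ k % 4 = j % 4) ∨ (∃ k, k < l.length ∧ l[k]? = some 'a' ∧ k % 4 = (j + 2) % 4)) := by
  obtain ⟨sA_nd, sB_nd, sA_rg, sB_rg, sA_mem, sB_mem⟩ := seeds_spec l
  obtain ⟨q1, q2, q3, q4, q5, q6⟩ := propagate_spec (l.length : Int) (l.length + 1) 0 (seeds l).1 (seeds l).2 sA_nd sB_nd sA_rg sB_rg (by omega)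
  obtain ⟨_, _, _, _, r5, _⟩ := propagate_spec (l.length : Int) (l.length + 1) 0 _ _ q2 q1 q4 q3 (by omega)
  simp only [List.drop_zero] at q5 q6 r5
  rw [r5 (j : Int)]
  constructor
  · rintro (hj1 | ⟨i, hi, hc⟩)
    · rcases (q6 (j : Int)).1 hj1 with hj2 | ⟨i, hi, hc⟩
      · obtain ⟨e0, e1, e2⟩ := (sB_mem (j : Int)).1 hj2
        refine Or.inl ⟨j, hj, ?_, rfl⟩
        simpa using e2
      · obtain ⟨e0, e1, e2⟩ := (sA_mem i).1 hi
        unfold cls at hc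
        exact Or.inr ⟨i.toNat, by omega, e2, by omega⟩
    · rcases (q6 i).1 hi with hj2 | ⟨s, hs, hcs⟩
      · obtain ⟨e0, e1, e2⟩ := (sB_mem i).1 hj2
        unfold cls at hc
        exact Or.inl ⟨i.toNat, by omega, e2, by omega⟩
      · obtain ⟨e0, e1, e2⟩ := (sA_mem s).1 hs
        unfold cls at hc hcs
        exact Or.inr ⟨s.toNat, by omega, e2, by omega⟩
  · rintro (⟨k, hk, hkc, hkr⟩ | ⟨k, hk, hkc, hkr⟩)
    · have hkS : (k : Int) ∈ (seeds l).2 := (sB_mem (k : Int)).2 ⟨by omega, by omega, by simpa using hkc⟩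
      have hkp := (q6 (k : Int)).2 (Or.inl hkS)
      refine Or.inr ⟨(k : Int), hkp, ?_⟩
      unfold cls
      refine ⟨by omega, by omega, by omega⟩
    · have hkS : (k : Int) ∈ (seeds l).1 := (sA_mem (k : Int)).2 ⟨by omega, by omega, by simpa using hkc⟩
      have hjp := (q6 (j : Int)).2 (Or.inr ⟨(k : Int), hkS, by unfold cls; exact ⟨by omega, by omega, by omega⟩⟩)
      exact Or.inl hjp

theorem final_memA (l : List Char) (j : Nat) (hj : j < l.length) :
    ((j : Int) ∈ (propagate (l.length : Int) (l.length + 1) 0 (propagate (l.length : Int) (l.length + 1) 0 (seeds l).1 (seeds l).2).2 (propagate (l.length : Int) (l.length + 1) 0 (seeds l).1 (seeds l).2).1).2) ↔ ((∃ k, k < l.length ∧ l[k]? = some 'a' ∧ k % 4 = j % 4) ∨ (∃ k, k < l.length ∧ l[k]? = some 'b' ∧ k % 4 = (j + 2) % 4)) := by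
  obtain ⟨sA_nd, sB_nd, sA_rg, sB_rg, sA_mem, sB_mem⟩ := seeds_spec l
  obtain ⟨q1, q2, q3, q4, q5, q6⟩ := propagate_spec (l.length : Int) (l.length + 1) 0 (seeds l).1 (seeds l).2 sA_nd sB_nd sA_rg sB_rg (by omega)
  obtain ⟨_, _, _, _, _, r6⟩ := propagate_spec (l.length : Int) (l.length + 1) 0 _ _ q2 q1 q4 q3 (by omega)
  simp only [List.drop_zero] at q5 q6 r6
  rw [r6 (j : Int)]
  constructor
  · rintro (hj1 | ⟨i, hi, hc⟩)
    · rcases (q5 (j : Int)).1 hj1 with hj2 | ⟨i, hi, hc⟩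
      · obtain ⟨e0, e1, e2⟩ := (sA_mem (j : Int)).1 hj2
        refine Or.inl ⟨j, hj, ?_, rfl⟩
        simpa using e2
      · obtain ⟨e0, e1, e2⟩ := (sA_mem i).1 hi
        unfold cls at hc
        exact Or.inl ⟨i.toNat, by omega, e2, by omega⟩
    · rcases (q6 i).1 hi with hj2 | ⟨s, hs, hcs⟩
      · obtain ⟨e0, e1, e2⟩ := (sB_mem i).1 hj2
        unfold cls at hc
        exact Or.inr ⟨i.toNat, by omega, e2, by omega⟩
      · obtain ⟨e0, e1, e2⟩ := (sA_mem s).1 hs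
        unfold cls at hc hcs
        exact Or.inl ⟨s.toNat, by omega, e2, by omega⟩
  · rintro (⟨k, hk, hkc, hkr⟩ | ⟨k, hk, hkc, hkr⟩)
    · have hkS : (k : Int) ∈ (seeds l).1 := (sA_mem (k : Int)).2 ⟨by omega, by omega, by simpa using hkc⟩
      exact Or.inl ((q5 (j : Int)).2 (Or.inr ⟨(k : Int), hkS, by unfold cls; exact ⟨by omega, by omega, by omega⟩⟩))
    · have hkS : (k : Int) ∈ (seeds l).2 := (sB_mem (k : Int)).2 ⟨by omega, by omega, by simpa using hkc⟩
      have hkp := (q6 (k : Int)).2 (Or.inl hkS)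
      exact Or.inr ⟨(k : Int), hkp, by unfold cls; exact ⟨by omega, by omega, by omega⟩⟩

-- ===== VERDICT (by name: the statement is the Claim_ definition above) =====
theorem assign_certain_chars3_spec : Claim_equal_assign_certain_chars3 := by
  intro st _hdom
  show assign_certain_chars3 st = assign_certain_chars3_alt st
  unfold assign_certain_chars3 assign_certain_chars3_alt
  dsimp only
  refine congrArg String.ofList ?_
  generalize st.toList = l
  obtain ⟨sA_nd, sB_nd, sA_rg, sB_rg, sA_mem, sB_mem⟩ := seeds_spec l
  obtain ⟨q1, q2, q3, q4, q5, q6⟩ := propagate_spec (l.length : Int) (l.length + 1) 0 (seeds l).1 (seeds l).2 sA_nd sB_nd sA_rg sB_rg (by omega)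
  obtain ⟨_, _, r3, r4, _, _⟩ := propagate_spec (l.length : Int) (l.length + 1) 0 _ _ q2 q1 q4 q3 (by omega)
  obtain ⟨wa_len, wa_get⟩ := write_fold 'a' (propagate (l.length : Int) (l.length + 1) 0 (propagate (l.length : Int) (l.length + 1) 0 (seeds l).1 (seeds l).2).2 (propagate (l.length : Int) (l.length + 1) 0 (seeds l).1 (seeds l).2).1).2 l r4
  have hb_rg : ∀ i ∈ (propagate (l.length : Int) (l.length + 1) 0 (propagate (l.length : Int) (l.length + 1) 0 (seeds l).1 (seeds l).2).2 (propagate (l.length : Int) (l.length + 1) 0 (seeds l).1 (seeds l).2).1).1, 0 ≤ i ∧ i < (((propagate (l.length : Int) (l.length + 1) 0 (propagate (l.length : Int) (l.length + 1) 0 (seeds l).1 (seeds l).2).2 (propagate (l.length : Int) (l.length + 1) 0 (seeds l).1 (seeds l).2).1).2.foldl (writeChar 'a') l).length : Int) := by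
    intro i hi
    refine ⟨(r3 i hi).1, ?_⟩
    rw [wa_len]
    exact (r3 i hi).2
  obtain ⟨wb_len, wb_get⟩ := write_fold 'b' (propagate (l.length : Int) (l.length + 1) 0 (propagate (l.length : Int) (l.length + 1) 0 (seeds l).1 (seeds l).2).2 (propagate (l.length : Int) (l.length + 1) 0 (seeds l).1 (seeds l).2).1).1 ((propagate (l.length : Int) (l.length + 1) 0 (propagate (l.length : Int) (l.length + 1) 0 (seeds l).1 (seeds l).2).2 (propagate (l.length : Int) (l.length + 1) 0 (seeds l).1 (seeds l).2).1).2.foldl (writeChar 'a') l) hb_rg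
  rw [PySem.List.foldl_prod_mk
      (fun acc ci => if ci.1 = 'a' then acc.set (ci.2 % 4) true else acc)
      (fun acc ci => if ci.1 = 'b' then acc.set (ci.2 % 4) true else acc)
      l.zipIdx (List.replicate 4 false) (List.replicate 4 false)]
  have hra : ∀ r, r < 4 → (l.zipIdx.foldl (fun acc ci => if ci.1 = 'a' then acc.set (ci.2 % 4) true else acc) (List.replicate 4 false)).getD r false
      = l.zipIdx.any (fun ci => ci.1 == 'a' && ci.2 % 4 == r) := by
    intro r hr
    rw [table_getD 'a' l.zipIdx (List.replicate 4 false) (by simp) r hr]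
    have h0 : (List.replicate 4 false).getD r false = false := by
      rw [List.getD_eq_getElem?_getD, List.getElem?_replicate]
      split_ifs <;> rfl
    rw [h0, Bool.false_or]
  have hrb : ∀ r, r < 4 → (l.zipIdx.foldl (fun acc ci => if ci.1 = 'b' then acc.set (ci.2 % 4) true else acc) (List.replicate 4 false)).getD r false
      = l.zipIdx.any (fun ci => ci.1 == 'b' && ci.2 % 4 == r) := by
    intro r hr
    rw [table_getD 'b' l.zipIdx (List.replicate 4 false) (by simp) r hr]
    have h0 : (List.replicate 4 false).getD r false = false := by
      rw [List.getD_eq_getElem?_getD, List.getElem?_replicate]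
      split_ifs <;> rfl
    rw [h0, Bool.false_or]
  refine List.ext_getElem? ?_
  intro j
  by_cases hj : j < l.length
  · rw [wb_get j (by rw [wa_len]; exact hj), wa_get j hj]
    rw [map_zipIdx_getElem? l _ j hj]
    dsimp only
    have hB := final_memB l j hj
    have hA := final_memA l j hj
    have e_b1 : ((l.zipIdx.foldl (fun acc ci => if ci.1 = 'b' then acc.set (ci.2 % 4) true else acc) (List.replicate 4 false)).getD (j % 4) false = true)
        ↔ (∃ k, k < l.length ∧ l[k]? = some 'b' ∧ k % 4 = j % 4) := by
      rw [hrb (j % 4) (by omega)]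
      exact any_residue l 'b' (j % 4)
    have e_a2 : ((l.zipIdx.foldl (fun acc ci => if ci.1 = 'a' then acc.set (ci.2 % 4) true else acc) (List.replicate 4 false)).getD ((j + 2) % 4) false = true)
        ↔ (∃ k, k < l.length ∧ l[k]? = some 'a' ∧ k % 4 = (j + 2) % 4) := by
      rw [hra ((j + 2) % 4) (by omega)]
      exact any_residue l 'a' ((j + 2) % 4)
    have e_a1 : ((l.zipIdx.foldl (fun acc ci => if ci.1 = 'a' then acc.set (ci.2 % 4) true else acc) (List.replicate 4 false)).getD (j % 4) false = true)
        ↔ (∃ k, k < l.length ∧ l[k]? = some 'a' ∧ k % 4 = j % 4) := by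
      rw [hra (j % 4) (by omega)]
      exact any_residue l 'a' (j % 4)
    have e_b2 : ((l.zipIdx.foldl (fun acc ci => if ci.1 = 'b' then acc.set (ci.2 % 4) true else acc) (List.replicate 4 false)).getD ((j + 2) % 4) false = true)
        ↔ (∃ k, k < l.length ∧ l[k]? = some 'b' ∧ k % 4 = (j + 2) % 4) := by
      rw [hrb ((j + 2) % 4) (by omega)]
      exact any_residue l 'b' ((j + 2) % 4)
    by_cases hcB : ((∃ k, k < l.length ∧ l[k]? = some 'b' ∧ k % 4 = j % 4) ∨ (∃ k, k < l.length ∧ l[k]? = some 'a' ∧ k % 4 = (j + 2) % 4))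
    · rw [if_pos (hB.2 hcB)]
      have hbool : ((l.zipIdx.foldl (fun acc ci => if ci.1 = 'b' then acc.set (ci.2 % 4) true else acc) (List.replicate 4 false)).getD (j % 4) false
          || (l.zipIdx.foldl (fun acc ci => if ci.1 = 'a' then acc.set (ci.2 % 4) true else acc) (List.replicate 4 false)).getD ((j + 2) % 4) false) = true := by
        rcases hcB with h | h
        · rw [e_b1.2 h]
          rw [Bool.true_or]
        · rw [e_a2.2 h]
          rw [Bool.or_true]
      rw [hbool]
      simp
    · rw [if_neg (fun h => hcB (hB.1 h))]
      have hb1 : (l.zipIdx.foldl (fun acc ci => if ci.1 = 'b' then acc.set (ci.2 % 4) true else acc) (List.replicate 4 false)).getD (j % 4) false = false := by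
        cases h : (l.zipIdx.foldl (fun acc ci => if ci.1 = 'b' then acc.set (ci.2 % 4) true else acc) (List.replicate 4 false)).getD (j % 4) false
        · rfl
        · exact absurd (Or.inl (e_b1.1 h)) hcB
      have ha2 : (l.zipIdx.foldl (fun acc ci => if ci.1 = 'a' then acc.set (ci.2 % 4) true else acc) (List.replicate 4 false)).getD ((j + 2) % 4) false = false := by
        cases h : (l.zipIdx.foldl (fun acc ci => if ci.1 = 'a' then acc.set (ci.2 % 4) true else acc) (List.replicate 4 false)).getD ((j + 2) % 4) false
        · rfl
        · exact absurd (Or.inr (e_a2.1 h)) hcB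
      rw [hb1, ha2]
      by_cases hcA : ((∃ k, k < l.length ∧ l[k]? = some 'a' ∧ k % 4 = j % 4) ∨ (∃ k, k < l.length ∧ l[k]? = some 'b' ∧ k % 4 = (j + 2) % 4))
      · rw [if_pos (hA.2 hcA)]
        have hbool : ((l.zipIdx.foldl (fun acc ci => if ci.1 = 'a' then acc.set (ci.2 % 4) true else acc) (List.replicate 4 false)).getD (j % 4) false
            || (l.zipIdx.foldl (fun acc ci => if ci.1 = 'b' then acc.set (ci.2 % 4) true else acc) (List.replicate 4 false)).getD ((j + 2) % 4) false) = true := by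
          rcases hcA with h | h
          · rw [e_a1.2 h]
            rw [Bool.true_or]
          · rw [e_b2.2 h]
            rw [Bool.or_true]
        rw [hbool]
        simp
      · rw [if_neg (fun h => hcA (hA.1 h))]
        have ha1 : (l.zipIdx.foldl (fun acc ci => if ci.1 = 'a' then acc.set (ci.2 % 4) true else acc) (List.replicate 4 false)).getD (j % 4) false = false := by
          cases h : (l.zipIdx.foldl (fun acc ci => if ci.1 = 'a' then acc.set (ci.2 % 4) true else acc) (List.replicate 4 false)).getD (j % 4) false
          · rfl
          · exact absurd (Or.inl (e_a1.1 h)) hcA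
        have hb2 : (l.zipIdx.foldl (fun acc ci => if ci.1 = 'b' then acc.set (ci.2 % 4) true else acc) (List.replicate 4 false)).getD ((j + 2) % 4) false = false := by
          cases h : (l.zipIdx.foldl (fun acc ci => if ci.1 = 'b' then acc.set (ci.2 % 4) true else acc) (List.replicate 4 false)).getD ((j + 2) % 4) false
          · rfl
          · exact absurd (Or.inr (e_b2.1 h)) hcA
        rw [ha1, hb2]
        rw [List.getElem?_eq_getElem hj]
        simp
  · push_neg at hj
    rw [List.getElem?_eq_none, List.getElem?_eq_none]
    · simpa using hj
    · rw [wb_len, wa_len]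
      exact hj
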